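-- pv_equiv track=rewrite | github.com/LuisEd2094/PushSwap | aux.py | get_values_for_else
-- ===== SOURCE A (Python) =====
-- def get_values_for_else(stack, stack_b, max_value):
--     stack_len = len(stack)
--     found = False
--     i = 0
--     value_to_move = 0
--     index_of_value_to_move = 0
--     min_value = max_value
--     min_value_index = 0
--     while i < stack_len:
--         if stack[i] < min_value:
--             min_value = stack[i]
--             min_value_index = i
--         if stack[i] < stack_b[0] and found == False:
--             value_to_move = stack[i]
--             index_of_value_to_move = i
--             found = True
--         elif (stack[i] < stack_b[0]) and (stack[i] > value_to_move) and (found == True):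
--             value_to_move = stack[i]
--             index_of_value_to_move = i
--         i += 1
--     if found == False:
--         value_to_move = min_value
--         index_of_value_to_move = min_value_index
--
--     return (found, index_of_value_to_move)
-- ===== SOURCE B (Python) =====
-- def get_values_for_else(stack, stack_b, max_value):
--     if not stack:
--         return (False, 0)
--     pivot = stack_b[0]
--     cands = [i for i, v in enumerate(stack) if v < pivot]
--     if cands:
--         return (True, max(cands, key=lambda i: stack[i]))
--     return (False, stack.index(min(stack)))
-- ===== Notes on version B (the rewrite author's own statement) =====
-- stated objective: simpler
-- what changed: Replaces the single interleaved while-loop with five mutable variables by declarative passes: a comprehension collecting candidate indices, max with a key for the best candidate, and min+index for the fallback minimum.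
-- intended difference: On nonempty stacks where no element is below the pivot stack_b[0] and none is below max_value (and the minimum is not at index 0), A returns (False, 0) because its min scan is capped at max_value and never fires, while B returns (False, index of the first minimum) - the intended fallback, since max_value is meant to be an upper bound of the stack. — e.g. on get_values_for_else([5, 3], [1], 3): A returns (false, 0), B returns (false, 1)
import Mathlib
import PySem

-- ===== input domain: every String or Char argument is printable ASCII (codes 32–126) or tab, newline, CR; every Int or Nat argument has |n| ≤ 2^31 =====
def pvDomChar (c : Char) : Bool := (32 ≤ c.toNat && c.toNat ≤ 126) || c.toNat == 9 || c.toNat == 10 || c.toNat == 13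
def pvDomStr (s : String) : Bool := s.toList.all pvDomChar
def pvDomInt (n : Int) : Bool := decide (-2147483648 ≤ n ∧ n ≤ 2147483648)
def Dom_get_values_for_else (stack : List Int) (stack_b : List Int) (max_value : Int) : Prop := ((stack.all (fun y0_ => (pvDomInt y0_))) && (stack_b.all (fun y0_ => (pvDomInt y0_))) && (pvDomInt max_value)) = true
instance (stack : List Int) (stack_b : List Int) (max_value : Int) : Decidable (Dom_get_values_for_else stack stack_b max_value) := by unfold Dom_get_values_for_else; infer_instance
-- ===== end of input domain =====

-- B replaces A's single interleaved while-loop (five mutable variables) by separate declarative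
-- passes (candidate-index comprehension, max-with-key, min + index); objective: simpler.
-- Intended difference (D_): when nothing is below the pivot and nothing is below max_value,
-- A returns index 0 (its min scan never fires); B returns the true index of the minimum.


-- ===== PORT A =====
-- state: (found, value_to_move, index_of_value_to_move, min_value, min_value_index); i counts up as in the while loop
def gvLoopA (b0 : Int) : List Int → Int → Bool → Int → Int → Int → Int → Bool × Int × Int × Int × Int
  | [], _, found, vtm, ivtm, mv, mvi => (found, vtm, ivtm, mv, mvi)
  | x :: rest, i, found, vtm, ivtm, mv, mvi =>
    let mv' := if x < mv then x else mv
    let mvi' := if x < mv then i else mvi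
    if x < b0 ∧ found = false then
      gvLoopA b0 rest (i + 1) true x i mv' mvi'
    else if x < b0 ∧ vtm < x ∧ found = true then
      gvLoopA b0 rest (i + 1) found x i mv' mvi'
    else
      gvLoopA b0 rest (i + 1) found vtm ivtm mv' mvi'

def get_values_for_else (stack : List Int) (stack_b : List Int) (max_value : Int) : Bool × Int :=
  match gvLoopA (PySem.List.pyGetD stack_b 0 0) stack 0 false 0 0 max_value 0 with
  | (found, _, ivtm, _, mvi) => if found = false then (found, mvi) else (found, ivtm)

-- ===== PORT B =====
def get_values_for_else_alt (stack : List Int) (stack_b : List Int) (max_value : Int) : Bool × Int :=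
  if stack = [] then (false, 0)
  else
    let pivot := PySem.List.pyGetD stack_b 0 0
    let cands := ((PySem.List.enumerate stack 0).filter (fun p => decide (p.2 < pivot))).map (fun p => p.1)
    if cands ≠ [] then
      match PySem.List.max? cands (fun i => PySem.List.pyGetD stack i 0) with
      | some j => (true, j)
      | none => (true, 0)
    else
      match PySem.List.min? stack (fun x => x) with
      | some m =>
        (false, match PySem.List.index? stack m with
                | some k => (k : Int)
                | none => 0)
      | none => (false, 0)

-- ===== PRECONDITION & SPEC =====
-- A evaluates stack_b[0] inside the loop: with stack nonempty and stack_b empty it raises IndexError.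
def Pre_get_values_for_else (stack : List Int) (stack_b : List Int) (max_value : Int) : Prop :=
  stack = [] ∨ stack_b ≠ []
instance (stack : List Int) (stack_b : List Int) (max_value : Int) : Decidable (Pre_get_values_for_else stack stack_b max_value) := by unfold Pre_get_values_for_else; infer_instance

def pvWitness_get_values_for_else : List Int × List Int × Int := ([1, 3, 2], [2], 5)

-- On nonempty stacks where no element is below the pivot and no element is below max_value,
-- A returns index 0 (its min scan, capped at max_value, never updates) while B returns the index of
-- the first minimum — the intended fallback, since max_value is meant to bound the stack from above.
def D_get_values_for_else (stack : List Int) (stack_b : List Int) (max_value : Int) : Prop :=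
  stack ≠ [] ∧ stack_b ≠ [] ∧
  (∀ x ∈ stack, stack_b.headI ≤ x) ∧ (∀ x ∈ stack, max_value ≤ x) ∧
  (∃ x ∈ stack, x < stack.headI)
instance (stack : List Int) (stack_b : List Int) (max_value : Int) : Decidable (D_get_values_for_else stack stack_b max_value) := by unfold D_get_values_for_else; infer_instance

def Spec_get_values_for_else (stack : List Int) (stack_b : List Int) (max_value : Int) (out : Bool × Int) : Prop := ¬ D_get_values_for_else stack stack_b max_value → out = get_values_for_else_alt stack stack_b max_value
instance (stack : List Int) (stack_b : List Int) (max_value : Int) (out : Bool × Int) : Decidable (Spec_get_values_for_else stack stack_b max_value out) := by unfold Spec_get_values_for_else; infer_instance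

def pvDiffWitness_get_values_for_else : List Int × List Int × Int := ([5, 3], [1], 3)
def pvDiffWitnessOut_get_values_for_else : (Bool × Int) × (Bool × Int) := ((false, 0), (false, 1))

-- ===== CLAIM (what is proved, stated in full; the proofs are below) =====
def Claim_unchanged_get_values_for_else : Prop := ∀ (stack : List Int) (stack_b : List Int) (max_value : Int), Dom_get_values_for_else stack stack_b max_value → Pre_get_values_for_else stack stack_b max_value → Spec_get_values_for_else stack stack_b max_value (get_values_for_else stack stack_b max_value)
def Claim_changed_get_values_for_else : Prop := Dom_get_values_for_else (pvDiffWitness_get_values_for_else.1) (pvDiffWitness_get_values_for_else.2.1) (pvDiffWitness_get_values_for_else.2.2) ∧ Pre_get_values_for_else (pvDiffWitness_get_values_for_else.1) (pvDiffWitness_get_values_for_else.2.1) (pvDiffWitness_get_values_for_else.2.2) ∧ D_get_values_for_else (pvDiffWitness_get_values_for_else.1) (pvDiffWitness_get_values_for_else.2.1) (pvDiffWitness_get_values_for_else.2.2) ∧ get_values_for_else (pvDiffWitness_get_values_for_else.1) (pvDiffWitness_get_values_for_else.2.1) (pvDiffWitness_get_values_for_else.2.2) = pvDiffWitnessOut_get_values_for_else.1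 ∧ get_values_for_else_alt (pvDiffWitness_get_values_for_else.1) (pvDiffWitness_get_values_for_else.2.1) (pvDiffWitness_get_values_for_else.2.2) = pvDiffWitnessOut_get_values_for_else.2 ∧ pvDiffWitnessOut_get_values_for_else.1 ≠ pvDiffWitnessOut_get_values_for_else.2
def Claim_exact_get_values_for_else : Prop := ∀ (stack : List Int) (stack_b : List Int) (max_value : Int), Dom_get_values_for_else stack stack_b max_value → Pre_get_values_for_else stack stack_b max_value → D_get_values_for_else stack stack_b max_value → get_values_for_else stack stack_b max_value ≠ get_values_for_else_alt stack stack_b max_value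

-- ===== LEMMAS AND PROOFS =====

-- proof-side helpers
def gvBest (ps : List (Int × Int)) (s : Int × Int) : Int × Int :=
  ps.foldl (fun s p => if s.1 < p.2 then (p.2, p.1) else s) s

def gvMin (ps : List (Int × Int)) (s : Int × Int) : Int × Int :=
  ps.foldl (fun s p => if p.2 < s.1 then (p.2, p.1) else s) s

-- A1: the found flag
theorem gvLoopA_fst (b0 : Int) (xs : List Int) (i : Int) (f : Bool) (vtm ivtm mv mvi : Int) :
    (gvLoopA b0 xs i f vtm ivtm mv mvi).1 = (f || xs.any (fun x => decide (x < b0))) := by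
  induction xs generalizing i f vtm ivtm mv mvi with
  | nil => simp [gvLoopA]
  | cons x rest ih =>
    simp only [gvLoopA, List.any_cons]
    split_ifs with h1 h2 <;> rw [ih] <;> cases f <;> simp_all

-- A2: the (min_value, min_value_index) pair
theorem gvLoopA_min (b0 : Int) (xs : List Int) (i : Int) (f : Bool) (vtm ivtm mv mvi : Int) :
    (gvLoopA b0 xs i f vtm ivtm mv mvi).2.2.2 = gvMin (PySem.List.enumerate xs i) (mv, mvi) := by
  induction xs generalizing i f vtm ivtm mv mvi with
  | nil => simp [gvLoopA, gvMin, PySem.List.enumerate]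
  | cons x rest ih =>
    simp only [gvLoopA, PySem.List.enumerate_cons, gvMin, List.foldl_cons]
    split_ifs with h1 h2 <;> rw [ih] <;> simp [gvMin]

-- A3: after found, (value_to_move, index) is the running best over the remaining candidates
theorem gvLoopA_found (b0 : Int) (xs : List Int) (i : Int) (vtm ivtm mv mvi : Int) :
    ((gvLoopA b0 xs i true vtm ivtm mv mvi).2.1, (gvLoopA b0 xs i true vtm ivtm mv mvi).2.2.1)
      = gvBest ((PySem.List.enumerate xs i).filter (fun p => decide (p.2 < b0))) (vtm, ivtm) := by
  induction xs generalizing i vtm ivtm mv mvi with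
  | nil => simp [gvLoopA, gvBest, PySem.List.enumerate]
  | cons x rest ih =>
    simp only [gvLoopA, PySem.List.enumerate_cons, List.filter_cons]
    by_cases hx : x < b0
    · simp only [hx, decide_true, if_true, gvBest, List.foldl_cons]
      by_cases hv : vtm < x
      · simp only [hv, and_true, true_and, if_true, Bool.true_eq_false, if_false]
        rw [ih]; simp [gvBest]
      · simp only [hv, and_true, if_false, Bool.true_eq_false, and_false]
        rw [ih]; simp [gvBest]
    · simp only [hx, decide_false, Bool.true_eq_false, false_and, and_false, if_false]
      rw [ih]; simp

-- A4: from the not-found state, once a candidate exists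
theorem gvLoopA_notfound (b0 : Int) (xs : List Int) (i : Int) (mv mvi : Int)
    (q : Int × Int) (qs : List (Int × Int))
    (h : (PySem.List.enumerate xs i).filter (fun p => decide (p.2 < b0)) = q :: qs) :
    (gvLoopA b0 xs i false 0 0 mv mvi).2.2.1 = (gvBest qs (q.2, q.1)).2 := by
  induction xs generalizing i mv mvi with
  | nil => simp [PySem.List.enumerate] at h
  | cons x t ih =>
    rw [PySem.List.enumerate_cons, List.filter_cons] at h
    by_cases hx : x < b0
    · simp only [hx, decide_true, if_true] at h
      obtain ⟨hq, hqs⟩ := List.cons.injEq .. ▸ h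
      simp only [gvLoopA]
      rw [if_pos ⟨hx, trivial⟩]
      have := gvLoopA_found b0 t (i + 1) x i (if x < mv then x else mv) (if x < mv then i else mvi)
      rw [show (gvBest qs (q.2, q.1)) = gvBest ((PySem.List.enumerate t (i + 1)).filter (fun p => decide (p.2 < b0))) (x, i) from by rw [hqs, ← hq]]
      exact congrArg Prod.snd this
    · simp only [hx, decide_false] at h
      simp only [gvLoopA, hx, false_and, if_false]
      exact ih (i + 1) _ _ h

-- enumerate pairs index their element
theorem enumerate_good_aux (xs : List Int) :
    ∀ (pre : List Int) (p : Int × Int), p ∈ PySem.List.enumerate xs (pre.length : Int) →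
      PySem.List.pyGetD (pre ++ xs) p.1 0 = p.2 := by
  induction xs with
  | nil => intro pre p hp; simp [PySem.List.enumerate] at hp
  | cons x t ih =>
    intro pre p hp
    rw [PySem.List.enumerate_cons] at hp
    rcases List.mem_cons.mp hp with h | h
    · subst h
      simp only [PySem.List.pyGetD_natCast]
      simp [List.getD_eq_getElem?_getD]
    · have := ih (pre ++ [x]) p (by simpa [add_comm] using h)
      simpa using this

theorem enumerate_good (stack : List Int) :
    ∀ p ∈ PySem.List.enumerate stack 0, PySem.List.pyGetD stack p.1 0 = p.2 := by
  intro p hp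
  simpa using enumerate_good_aux stack [] p (by simpa using hp)

-- B's max?-foldl equals the pair fold, under the goodness invariant
theorem maxfold_eq_gvBest (stack : List Int) (qs : List (Int × Int)) (acc : Int × Int)
    (hqs : ∀ p ∈ qs, PySem.List.pyGetD stack p.1 0 = p.2)
    (hacc : PySem.List.pyGetD stack acc.2 0 = acc.1) :
    PySem.List.max? (acc.2 :: qs.map (fun p => p.1)) (fun i => PySem.List.pyGetD stack i 0)
      = some ((gvBest qs acc).2) := by
  induction qs generalizing acc with
  | nil => simp [PySem.List.max?, gvBest]
  | cons q t ih =>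
    simp only [PySem.List.max?, List.map_cons, List.foldl_cons, gvBest, hacc,
      hqs q (List.mem_cons_self)]
    by_cases hlt : acc.1 < q.2
    · simp only [hlt, if_true]
      have := ih (q.2, q.1) (fun p hp => hqs p (List.mem_cons_of_mem _ hp)) (by simpa using hqs q List.mem_cons_self)
      simpa [PySem.List.max?, gvBest] using this
    · simp only [hlt, if_false]
      have := ih acc (fun p hp => hqs p (List.mem_cons_of_mem _ hp)) hacc
      simpa [PySem.List.max?, gvBest] using this

theorem foldl_min_le_init (xs : List Int) (a : Int) : xs.foldl min a ≤ a := by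
  induction xs generalizing a with
  | nil => simp
  | cons x t ih => exact le_trans (ih (min a x)) (min_le_left a x)

theorem foldl_min_le_mem (xs : List Int) (a : Int) : ∀ x ∈ xs, xs.foldl min a ≤ x := by
  induction xs generalizing a with
  | nil => intro x hx; simp at hx
  | cons y t ih =>
    intro x hx
    rcases List.mem_cons.mp hx with h | h
    · subst h
      exact le_trans (foldl_min_le_init t (min a x)) (min_le_right a x)
    · exact ih (min a y) x h

theorem foldl_min_init (xs : List Int) (a b : Int) :
    xs.foldl min (min a b) = min a (xs.foldl min b) := by
  induction xs generalizing b with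
  | nil => simp
  | cons x t ih => simp only [List.foldl_cons, min_assoc, ih]

-- the min scan, characterised
theorem gvMin_char (xs : List Int) (i mv : Int) (mvi : Int) :
    gvMin (PySem.List.enumerate xs i) (mv, mvi)
      = (xs.foldl min mv,
         if xs.foldl min mv < mv then i + (List.idxOf (xs.foldl min mv) xs : Int) else mvi) := by
  induction xs generalizing i mv mvi with
  | nil => simp [gvMin, PySem.List.enumerate]
  | cons x t ih =>
    simp only [gvMin, PySem.List.enumerate_cons, List.foldl_cons] at *
    by_cases hx : x < mv
    · rw [show ((if x < mv then ((x:Int), i) else (mv, mvi)) : Int × Int) = (x, i) from by simp [hx]]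
      rw [show min mv x = x from by omega]
      rw [ih]
      have hvx : t.foldl min x ≤ x := foldl_min_le_init t x
      by_cases hv : t.foldl min x < x
      · have hne : x ≠ t.foldl min x := by omega
        rw [List.idxOf_cons_ne t hne]
        simp only [hv, if_true, show t.foldl min x < mv from by omega]
        simp only [Prod.mk.injEq, true_and]; push_cast; ring
      · have hvex : t.foldl min x = x := by omega
        rw [hvex]
        simp [List.idxOf_cons_self, hx]
    · rw [show ((if x < mv then ((x:Int), i) else (mv, mvi)) : Int × Int) = (mv, mvi) from by simp [hx]]
      rw [show min mv x = mv from by omega]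
      rw [ih]
      by_cases hv : t.foldl min mv < mv
      · have hne : x ≠ t.foldl min mv := by omega
        rw [List.idxOf_cons_ne t hne]
        simp only [hv, if_true]
        simp only [Prod.mk.injEq, true_and]; push_cast; ring
      · simp [hv]

-- candidates nonempty iff some element is below the pivot
theorem filter_enum_ne_nil (b0 : Int) (xs : List Int) (i : Int) :
    ((PySem.List.enumerate xs i).filter (fun p => decide (p.2 < b0)) ≠ [])
      ↔ xs.any (fun x => decide (x < b0)) = true := by
  induction xs generalizing i with
  | nil => simp [PySem.List.enumerate]
  | cons x t ih =>
    rw [PySem.List.enumerate_cons, List.filter_cons]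
    by_cases hx : x < b0 <;> simp [hx, ih]

theorem idxOf?_eq_some_of_mem (m : Int) (l : List Int) (h : m ∈ l) :
    List.idxOf? m l = some (List.idxOf m l) := by
  induction l with
  | nil => simp at h
  | cons x t ih =>
    by_cases hx : x = m
    · subst hx; simp [List.idxOf?_cons, List.idxOf_cons_self]
    · rcases List.mem_cons.mp h with h' | h'
      · exact absurd h'.symm hx
      · simp [List.idxOf?_cons, hx, ih h']

theorem foldl_min_mem (xs : List Int) (a : Int) : xs.foldl min a = a ∨ xs.foldl min a ∈ xs := by
  induction xs generalizing a with
  | nil => left; rfl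
  | cons x t ih =>
    rcases ih (min a x) with h | h
    · rw [List.foldl_cons, h]
      rcases le_total a x with hax | hax
      · left; exact min_eq_left hax
      · right; rw [min_eq_right hax]; exact List.mem_cons_self
    · right; right; exact h

theorem pyGetD_head (h : Int) (t : List Int) : PySem.List.pyGetD (h :: t) 0 0 = h := by
  simp [PySem.List.pyGetD, PySem.List.pyGet?, PySem.List.pyIdx?]

-- ===== VERDICT (by name: the statement is the Claim_ definition above) =====
theorem get_values_for_else_spec : Claim_unchanged_get_values_for_else := by
  intro stack stack_b mval hdom hpre
  unfold Spec_get_values_for_else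
  intro hnD
  by_cases hs : stack = []
  · subst hs
    simp [get_values_for_else, get_values_for_else_alt, gvLoopA]
  · have hsb : stack_b ≠ [] := by
      rcases hpre with h | h
      · exact absurd h hs
      · exact h
    have hA : get_values_for_else stack stack_b mval
        = (let r := gvLoopA (PySem.List.pyGetD stack_b 0 0) stack 0 false 0 0 mval 0;
           if r.1 = false then (r.1, r.2.2.2.2) else (r.1, r.2.2.1)) := rfl
    set b0 := PySem.List.pyGetD stack_b 0 0 with hb0
    set ps := (PySem.List.enumerate stack 0).filter (fun p => decide (p.2 < b0)) with hps
    have hfst := gvLoopA_fst b0 stack 0 false 0 0 mval 0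
    rw [Bool.false_or] at hfst
    by_cases hany : stack.any (fun x => decide (x < b0)) = true
    · -- some element is below the pivot
      obtain ⟨q, qs, hcons⟩ := List.exists_cons_of_ne_nil ((filter_enum_ne_nil b0 stack 0).mpr hany)
      have hgood : ∀ p ∈ ps, PySem.List.pyGetD stack p.1 0 = p.2 :=
        fun p hp => enumerate_good stack p (List.mem_of_mem_filter hp)
      have hqmem : q ∈ ps := by rw [hps, hcons]; exact List.mem_cons_self
      have hAval : get_values_for_else stack stack_b mval = (true, (gvBest qs (q.2, q.1)).2) := by
        rw [hA]
        simp only [hfst, hany, Bool.true_eq_false, if_false]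
        rw [gvLoopA_notfound b0 stack 0 mval 0 q qs hcons]
      have hBval : get_values_for_else_alt stack stack_b mval = (true, (gvBest qs (q.2, q.1)).2) := by
        have hmax := maxfold_eq_gvBest stack qs (q.2, q.1)
              (fun p hp => hgood p (by rw [hps, hcons]; exact List.mem_cons_of_mem q hp))
              (by simpa using hgood q hqmem)
        simp only [get_values_for_else_alt, if_neg hs]
        rw [hcons]
        simp only [List.map_cons, ne_eq, reduceCtorEq, not_false_eq_true, if_true]
        rw [show ((q.2, q.1).2 : Int) = q.1 from rfl] at hmax
        rw [hmax]
      rw [hAval, hBval]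
    · -- no element below the pivot: the min branch
      obtain ⟨h, tl, hht⟩ := List.exists_cons_of_ne_nil hs
      have hpsnil : ps = [] := by
        by_contra hne
        exact hany ((filter_enum_ne_nil b0 stack 0).mp hne)
      rw [Bool.not_eq_true] at hany
      have hge : ∀ x ∈ stack, b0 ≤ x := by
        intro x hx
        by_contra hlt
        have : stack.any (fun x => decide (x < b0)) = true := by
          rw [List.any_eq_true]; exact ⟨x, hx, by simpa using by omega⟩
        simp [this] at hany
      have hmchar := gvMin_char stack 0 mval 0
      have hmin := gvLoopA_min b0 stack 0 false 0 0 mval 0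
      set v := stack.foldl min mval with hv
      have hAval : get_values_for_else stack stack_b mval
          = (false, if v < mval then (List.idxOf v stack : Int) else 0) := by
        rw [hA]
        simp only [hfst, hany]
        simp only [if_true]
        have : (gvLoopA b0 stack 0 false 0 0 mval 0).2.2.2.2
            = (gvMin (PySem.List.enumerate stack 0) (mval, 0)).2 := by rw [← hmin]
        rw [show (gvLoopA b0 stack 0 false 0 0 mval 0).2.2.2.2
              = if v < mval then (0 : Int) + (List.idxOf v stack : Int) else 0 from by
          rw [this, hmchar]]
        simp
      have hm2 : PySem.List.min? stack (fun x => x) = some (tl.foldl min h) := by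
        rw [hht]; exact PySem.List.min?_id_cons h tl
      set m := tl.foldl min h with hmdef
      have hvm : v = min mval m := by
        rw [hv, hht, List.foldl_cons, ← foldl_min_init]
      have hmmem : m ∈ stack := by
        rw [hht, hmdef]
        rcases foldl_min_mem tl h with h1 | h1
        · rw [h1]; exact List.mem_cons_self
        · exact List.mem_cons_of_mem h h1
      have hBval : get_values_for_else_alt stack stack_b mval
          = (false, (List.idxOf m stack : Int)) := by
        simp only [get_values_for_else_alt, if_neg hs]
        rw [hps] at hpsnil
        rw [hpsnil]
        simp only [List.map_nil, ne_eq, not_true_eq_false, if_false]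
        rw [hm2]
        show (false, match PySem.List.index? stack m with
                     | some k => (k : Int) | none => 0) = _
        rw [show PySem.List.index? stack m = some (List.idxOf m stack) from by
          rw [PySem.List.index?_eq_idxOf?]; exact idxOf?_eq_some_of_mem m stack hmmem]
      rw [hAval, hBval]
      by_cases hmlt : m < mval
      · have hveq : v = m := by omega
        simp [hmlt, hveq]
      · -- mval ≤ m: A returns 0; outside D_ the head must be a minimum, so idxOf m = 0
        have hnlt : ¬ v < mval := by omega
        simp only [hnlt, if_false]
        -- every element is ≥ mval
        have hallm : ∀ x ∈ stack, mval ≤ x := by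
          intro x hx
          have : m ≤ x := by
            rw [hht] at hx
            rcases List.mem_cons.mp hx with h1 | h1
            · subst h1; exact foldl_min_le_init tl x
            · exact foldl_min_le_mem tl h x h1
          omega
      -- b0 = headI stack_b
        have hb0h : b0 = stack_b.headI := by
          obtain ⟨hb, tb, hbt⟩ := List.exists_cons_of_ne_nil hsb
          rw [hb0, hbt, pyGetD_head]; rfl
        have hnoless : ¬ ∃ x ∈ stack, x < stack.headI := by
          intro hex
          exact hnD ⟨hs, hsb, by rw [← hb0h]; exact hge, hallm, hex⟩
        -- so the head is a minimum: m = head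
        have hhead : stack.headI = h := by rw [hht]; rfl
        have hhle : h ≤ m := by
          by_contra hc
          exact hnoless ⟨m, hmmem, by rw [hhead]; omega⟩
        have hmle : m ≤ h := by
          rw [hmdef]; exact foldl_min_le_init tl h
        have hmh : m = h := le_antisymm hmle hhle
        rw [hht, hmh, List.idxOf_cons_self]
        simp

theorem get_values_for_else_changed : Claim_changed_get_values_for_else := by
  unfold Claim_changed_get_values_for_else; decide

theorem get_values_for_else_tight : Claim_exact_get_values_for_else := by
  intro stack stack_b mval hdom hpre hD
  obtain ⟨hs, hsb, hge, hallm, x0, hx0mem, hx0lt⟩ := hD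
  obtain ⟨h, tl, hht⟩ := List.exists_cons_of_ne_nil hs
  have hb0h : PySem.List.pyGetD stack_b 0 0 = stack_b.headI := by
    obtain ⟨hb, tb, hbt⟩ := List.exists_cons_of_ne_nil hsb
    rw [hbt, pyGetD_head]; rfl
  set b0 := PySem.List.pyGetD stack_b 0 0 with hb0
  have hany : stack.any (fun x => decide (x < b0)) = false := by
    rw [List.any_eq_false]
    intro x hx
    have := hge x hx
    rw [hb0h]; simpa using by omega
  -- A returns (false, 0)
  have hfst := gvLoopA_fst b0 stack 0 false 0 0 mval 0
  rw [Bool.false_or] at hfst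
  have hmin := gvLoopA_min b0 stack 0 false 0 0 mval 0
  have hmchar := gvMin_char stack 0 mval 0
  have hvge : ¬ stack.foldl min mval < mval := by
    have : ∀ x ∈ stack, mval ≤ x := hallm
    rw [hht, List.foldl_cons, foldl_min_init]
    have h1 : mval ≤ h := hallm h (by rw [hht]; exact List.mem_cons_self)
    have h2 : mval ≤ tl.foldl min h := by
      rcases foldl_min_mem tl h with he | he
      · omega
      · have := hallm _ (by rw [hht]; exact List.mem_cons_of_mem h he); omega
    omega
  have hAval : get_values_for_else stack stack_b mval = (false, 0) := by
    show (match gvLoopA b0 stack 0 false 0 0 mval 0 with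
      | (found, _, ivtm, _, mvi) => if found = false then (found, mvi) else (found, ivtm)) = _
    rw [show gvLoopA b0 stack 0 false 0 0 mval 0
        = ((gvLoopA b0 stack 0 false 0 0 mval 0).1, (gvLoopA b0 stack 0 false 0 0 mval 0).2.1,
           (gvLoopA b0 stack 0 false 0 0 mval 0).2.2.1, (gvLoopA b0 stack 0 false 0 0 mval 0).2.2.2.1,
           (gvLoopA b0 stack 0 false 0 0 mval 0).2.2.2.2) from rfl]
    simp only [hfst, hany, if_true]
    rw [show (gvLoopA b0 stack 0 false 0 0 mval 0).2.2.2.2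
        = (gvMin (PySem.List.enumerate stack 0) (mval, 0)).2 from by rw [← hmin]]
    rw [hmchar]
    simp [hvge]
  -- B returns (false, idxOf m) with idxOf m ≠ 0
  have hpsnil : (PySem.List.enumerate stack 0).filter (fun p => decide (p.2 < b0)) = [] := by
    by_contra hne
    rw [(filter_enum_ne_nil b0 stack 0).mp hne] at hany
    exact Bool.true_eq_false ▸ hany.symm ▸ (by simp at hany)
  have hm2 : PySem.List.min? stack (fun x => x) = some (tl.foldl min h) := by
    rw [hht]; exact PySem.List.min?_id_cons h tl
  set m := tl.foldl min h with hmdef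
  have hmmem : m ∈ stack := by
    rw [hht, hmdef]
    rcases foldl_min_mem tl h with h1 | h1
    · rw [h1]; exact List.mem_cons_self
    · exact List.mem_cons_of_mem h h1
  have hmlt : m < h := by
    have hx0h : x0 < h := by rwa [hht] at hx0lt
    have : m ≤ x0 := by
      rw [hht] at hx0mem
      rcases List.mem_cons.mp hx0mem with h1 | h1
      · subst h1; exact hmdef ▸ foldl_min_le_init tl x0
      · exact hmdef ▸ foldl_min_le_mem tl h x0 h1
    omega
  have hBval : get_values_for_else_alt stack stack_b mval
      = (false, (List.idxOf m stack : Int)) := by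
    simp only [get_values_for_else_alt, if_neg hs, ← hb0]
    rw [hpsnil]
    simp only [List.map_nil, ne_eq, not_true_eq_false, if_false]
    rw [hm2]
    show (false, match PySem.List.index? stack m with
                 | some k => (k : Int) | none => 0) = _
    rw [show PySem.List.index? stack m = some (List.idxOf m stack) from by
      rw [PySem.List.index?_eq_idxOf?]; exact idxOf?_eq_some_of_mem m stack hmmem]
  have hidx : List.idxOf m stack = List.idxOf m tl + 1 := by
    rw [hht]; exact List.idxOf_cons_ne tl (by omega)
  rw [hAval, hBval]
  intro hcontra
  have : (0 : Int) = (List.idxOf m stack : Int) := congrArg Prod.snd hcontra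
  rw [hidx] at this
  push_cast at this
  omega
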